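-- pv_equiv track=rewrite | github.com/teallix/fps-game | all files/c++/python/idk.py | check_valid_note
-- ===== SOURCE A (Python) =====
-- def check_valid_note(note):
--     if not note:
--         return True
--
--     if note.endswith("."):
--         return check_valid_note(note[:-1])
--
--     if note[0] in [
--         'a', 'b', 'c', 'd', 'e', 'f', 'g', 'p', 'a#', 'b#', 'c#', 'd#', 'e#', 'f#', 'g#'
--     ]:
--         return check_valid_note(note[1:])
--
--     if note[0].isdigit():
--         length = note[0]
--         while len(note) > 1 and note[1].isdigit():
--             length += note[1]
--             note = note[1:]
--         if int(length) in [1, 2, 4, 8, 16, 32]: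
--             if len(note) > 1 and note[1].isdigit() and int(note[1]) in [1, 2, 3, 4, 5, 6, 7, 8]:
--                 return check_valid_note(note[2:])
--             elif len(note) >1 and note[1] == '#':
--                 return check_valid_note(note[2:])
--             else:
--                 return check_valid_note(note[1:])
--
--     return False
-- ===== SOURCE B (Python) =====
-- def check_valid_note(note):
--     # single left-to-right pointer scan over the string with all trailing dots
--     # stripped up front (A re-checks/strips the tail at every recursive step,
--     # but front consumption never changes the last character, so one rstrip
--     # is equivalent); no recursion, no slice copies.
--     s = note.rstrip('.')
--     n = len(s)
--     i = 0
--     while i < n: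
--         c = s[i]
--         if c in 'abcdefgp':
--             i += 1
--         elif c.isdigit():
--             j = i
--             while j < n and s[j].isdigit():
--                 j += 1
--             if int(s[i:j]) not in (1, 2, 4, 8, 16, 32):
--                 return False
--             i = j
--             if i < n and s[i] == '#':
--                 i += 1
--         else:
--             return False
--     return True
-- ===== Notes on version B (the rewrite author's own statement) =====
-- stated objective: faster
-- what changed: A's recursive descent that strips/reslices the string at every step (a fresh copy per character) is replaced by one rstrip of trailing dots followed by a single left-to-right index-pointer scan.
import Mathlib
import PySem

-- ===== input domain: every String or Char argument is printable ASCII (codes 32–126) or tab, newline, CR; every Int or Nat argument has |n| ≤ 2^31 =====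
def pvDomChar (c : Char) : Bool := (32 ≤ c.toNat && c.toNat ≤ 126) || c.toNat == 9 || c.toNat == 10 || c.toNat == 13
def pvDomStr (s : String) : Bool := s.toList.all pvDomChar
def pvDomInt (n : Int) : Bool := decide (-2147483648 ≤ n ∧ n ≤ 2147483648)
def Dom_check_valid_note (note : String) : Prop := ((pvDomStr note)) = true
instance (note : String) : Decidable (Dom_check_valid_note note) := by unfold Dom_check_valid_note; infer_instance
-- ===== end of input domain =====

-- B replaces A's recursive slicing (a fresh string copy per recursive step) by one rstrip of
-- the trailing dots plus a single left-to-right pointer scan (objective: faster).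

-- ===== PORT A =====
-- the inner `while len(note) > 1 and note[1].isdigit(): length += note[1]; note = note[1:]`
-- loop of A, on the pair (length, note); PySem.Chars.isdigit is Python's str.isdigit on one
-- character, exact on the ASCII domain
def pvDigitRun (len note : List Char) : List Char × List Char :=
  match note with
  | a :: b :: rest =>
    if PySem.Chars.isdigit b then pvDigitRun (len ++ [b]) (b :: rest) else (len, a :: b :: rest)
  | _ => (len, note)


-- characterisation of the loop, cited by the termination proofs below (and by the equivalence proofs)
theorem pvDigitRun_spec (len : List Char) (a : Char) (cs : List Char) :
    pvDigitRun len (a :: cs) = (len ++ cs.takeWhile PySem.Chars.isdigit,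
      (cs.takeWhile PySem.Chars.isdigit).getLastD a :: cs.dropWhile PySem.Chars.isdigit) := by
  induction cs generalizing len a with
  | nil => simp [pvDigitRun]
  | cons b rest ih =>
    rw [pvDigitRun]
    by_cases hb : PySem.Chars.isdigit b
    · simp [hb, ih, List.getLast?_cons, List.getLastD_eq_getLast?]
    · simp [hb]


-- A's recursion, on the character list; Python's `note.endswith(".")` / `note[:-1]` / `note[1:]`
-- / `note[2:]` are getLast? / dropLast / tail-pattern / the matched `rest`; the two-character
-- entries 'a#' … 'g#' of A's membership list can never equal the single character note[0], so
-- the membership keeps only the single-character entries (exact); `int(length)` is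
-- PySem.Int.ofChars? with default 0 — the run is a nonempty digit string there, so ofChars?
-- is always `some` (exact)
def pvGoA (note : List Char) : Bool :=
  match hn : note with
  | [] => true
  | c :: cs =>
    if note.getLast? = some '.' then pvGoA note.dropLast
    else if c ∈ ['a', 'b', 'c', 'd', 'e', 'f', 'g', 'p'] then pvGoA cs
    else if PySem.Chars.isdigit c then
      let r := pvDigitRun [c] (c :: cs)
      if (PySem.Int.ofChars? r.1).getD 0 ∈ ([1, 2, 4, 8, 16, 32] : List Int) then
        match hr : r.2 with
        | _ :: d :: rest =>
          if PySem.Chars.isdigit d &&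
              decide ((PySem.Int.ofChars? [d]).getD 0 ∈ ([1, 2, 3, 4, 5, 6, 7, 8] : List Int)) then
            pvGoA rest
          else if d = '#' then pvGoA rest
          else pvGoA (d :: rest)
        | _ => pvGoA r.2.tail
      else false
    else false
  termination_by note.length
  decreasing_by
    · subst hn; simp [List.length_dropLast]
    · subst hn; simp
    all_goals {
      subst hn
      have hd := List.length_dropWhile_le (p := PySem.Chars.isdigit) (l := cs)
      first
      | (replace hr : (pvDigitRun [c] (c :: cs)).2 = _ := hr
         rw [pvDigitRun_spec] at hr
         have := congrArg List.length hr
         simp at this ⊢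
         omega)
      | (show (pvDigitRun [c] (c :: cs)).2.tail.length < (c :: cs).length
         rw [pvDigitRun_spec]
         simp
         omega)
    }


def check_valid_note (note : String) : Bool := pvGoA note.toList

-- ===== PORT B =====
-- B's pointer loop `while i < n:` as recursion on the remaining suffix s[i:]; B's inner
-- digit-run scan `while j < n and s[j].isdigit(): j += 1` and the slice s[i:j] are
-- takeWhile/dropWhile on that suffix
def pvScanB (s : List Char) : Bool :=
  match s with
  | [] => true
  | c :: cs =>
    if c ∈ ['a', 'b', 'c', 'd', 'e', 'f', 'g', 'p'] then pvScanB cs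
    else if PySem.Chars.isdigit c then
      let run := (c :: cs).takeWhile PySem.Chars.isdigit
      let rest := (c :: cs).dropWhile PySem.Chars.isdigit
      if (PySem.Int.ofChars? run).getD 0 ∈ ([1, 2, 4, 8, 16, 32] : List Int) then
        if rest.head? = some '#' then pvScanB rest.tail else pvScanB rest
      else false
    else false
  termination_by s.length
  decreasing_by
    · simp
    · show ((c :: cs).dropWhile PySem.Chars.isdigit).tail.length < (c :: cs).length
      have h1 := List.length_dropWhile_le (p := PySem.Chars.isdigit) (l := c :: cs)
      have h2 : (((c :: cs).dropWhile PySem.Chars.isdigit).tail).length ≤ ((c :: cs).dropWhile PySem.Chars.isdigit).length := by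
        cases (c :: cs).dropWhile PySem.Chars.isdigit <;> simp
      simp at *; omega
    · show ((c :: cs).dropWhile PySem.Chars.isdigit).length < (c :: cs).length
      rename_i hc _ _
      rw [List.dropWhile_cons_of_pos hc]
      have h1 := List.length_dropWhile_le (p := PySem.Chars.isdigit) (l := cs)
      simp; omega


-- `note.rstrip('.')`: drop the trailing '.' characters (ported by hand, exact)
def pvRstripDots (s : List Char) : List Char := (s.reverse.dropWhile (· = '.')).reverse


def check_valid_note_alt (note : String) : Bool := pvScanB (pvRstripDots note.toList)

-- ===== PRECONDITION & SPEC =====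
def Spec_check_valid_note (note : String) (out : Bool) : Prop := out = check_valid_note_alt note
instance (note : String) (out : Bool) : Decidable (Spec_check_valid_note note out) := by unfold Spec_check_valid_note; infer_instance

-- ===== CLAIM (what is proved, stated in full; the proofs are below) =====
def Claim_equal_check_valid_note : Prop := ∀ (note : String), Dom_check_valid_note note → Spec_check_valid_note note (check_valid_note note)

-- ===== LEMMAS AND PROOFS =====
lemma getLast?_of_suffix {l₁ l₂ : List Char} (h : l₁ <:+ l₂) (hne : l₁ ≠ []) :
    l₁.getLast? = l₂.getLast? := by
  obtain ⟨t, rfl⟩ := h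
  exact (List.getLast?_append_of_ne_nil (l₁ := t) hne).symm


lemma pvGoA_nil : pvGoA [] = true := by rw [pvGoA]
lemma pvScanB_nil : pvScanB [] = true := by rw [pvScanB]

lemma goA_eq_scanB : ∀ (n : Nat) (l : List Char), l.length ≤ n → l.getLast? ≠ some '.' →
    pvGoA l = pvScanB l := by
  intro n
  induction n with
  | zero =>
    intro l hl _
    have : l = [] := List.eq_nil_of_length_eq_zero (Nat.le_zero.mp hl)
    subst this
    rw [pvGoA_nil, pvScanB_nil]
  | succ n ih =>
    intro l hl hlast
    match l with
    | [] => rw [pvGoA_nil, pvScanB_nil]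
    | c :: cs =>
      have hsuf : ∀ t : List Char, t <:+ cs → pvGoA t = pvScanB t := by
        intro t ht
        rcases eq_or_ne t [] with rfl | htne
        · rw [pvGoA_nil, pvScanB_nil]
        · refine ih t ?_ ?_
          · have := ht.length_le; simp at hl; omega
          · rw [getLast?_of_suffix (ht.trans (List.suffix_cons c cs)) htne]; exact hlast
      rw [pvGoA, pvScanB]
      simp only [hlast, if_false]
      by_cases hmem : c ∈ ['a', 'b', 'c', 'd', 'e', 'f', 'g', 'p']
      · simp only [hmem, if_pos]
        exact hsuf cs (List.suffix_rfl)
      · simp only [hmem, if_false]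
        by_cases hc : PySem.Chars.isdigit c
        · simp only [hc, if_pos]
          rw [List.takeWhile_cons_of_pos hc, List.dropWhile_cons_of_pos hc]
          have hfst : (pvDigitRun [c] (c :: cs)).1 = c :: List.takeWhile PySem.Chars.isdigit cs := by
            rw [pvDigitRun_spec]; rfl
          rw [hfst]
          by_cases hval : (PySem.Int.ofChars? (c :: List.takeWhile PySem.Chars.isdigit cs)).getD 0
              ∈ ([1, 2, 4, 8, 16, 32] : List Int)
          · rw [if_pos hval, if_pos hval]
            split
            · rename_i head d rest hr
              rw [pvDigitRun_spec] at hr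
              obtain ⟨rfl, hdw⟩ : head = (List.takeWhile PySem.Chars.isdigit cs).getLastD c ∧
                  List.dropWhile PySem.Chars.isdigit cs = d :: rest := by
                injection hr with h1 h2; exact ⟨h1.symm, h2⟩
              have hd : PySem.Chars.isdigit d = false := by
                have h := List.head_dropWhile_not (p := PySem.Chars.isdigit) (l := cs)
                  (by rw [hdw]; simp)
                simpa [hdw] using h
              rw [hdw]
              simp only [hd, Bool.false_and]
              by_cases hsharp : d = '#'
              · subst hsharp
                simp only [List.head?_cons, List.tail_cons, reduceIte]
                exact hsuf rest ((List.suffix_cons _ _).trans (hdw ▸ List.dropWhile_suffix _))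
              · rw [if_neg hsharp, if_neg (show ¬((d :: rest).head? = some '#') by simp [hsharp])]
                exact hsuf (d :: rest) (hdw ▸ List.dropWhile_suffix _)
            · rename_i hr
              rw [pvDigitRun_spec] at hr
              have hdw : List.dropWhile PySem.Chars.isdigit cs = [] := by
                cases h : List.dropWhile PySem.Chars.isdigit cs with
                | nil => rfl
                | cons d rest =>
                  exact (hr ((List.takeWhile PySem.Chars.isdigit cs).getLastD c) d rest (by rw [h])).elim
              rw [pvDigitRun_spec]
              simp [hdw, pvGoA_nil, pvScanB_nil]
          · rw [if_neg hval, if_neg hval]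
        · simp only [hc, Bool.false_eq_true, if_false]

lemma rstrip_of_last_dot {l : List Char} (h : l.getLast? = some '.') :
    pvRstripDots l = pvRstripDots l.dropLast := by
  have hrev : l.reverse.head? = some '.' := by rwa [List.head?_reverse]
  cases hr : l.reverse with
  | nil => rw [hr] at hrev; simp at hrev
  | cons a t =>
    rw [hr] at hrev; simp at hrev
    have hdl : l.dropLast.reverse = t := by
      have : l = t.reverse ++ [a] := by
        have := congrArg List.reverse hr; simpa using this
      rw [this]; simp
    unfold pvRstripDots
    rw [hr, hdl, hrev, List.dropWhile_cons_of_pos (by simp)]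

lemma rstrip_of_last_ne_dot {l : List Char} (h : l.getLast? ≠ some '.') :
    pvRstripDots l = l := by
  unfold pvRstripDots
  cases hr : l.reverse with
  | nil => simpa using congrArg List.reverse hr
  | cons a t =>
    have ha : ¬(a = '.') := by
      intro hae
      apply h
      rw [← List.head?_reverse, hr, hae]
      simp
    rw [List.dropWhile_cons_of_neg (by simpa using ha), ← hr]
    simp

lemma rstrip_last_ne_dot (l : List Char) : (pvRstripDots l).getLast? ≠ some '.' := by
  unfold pvRstripDots
  rw [List.getLast?_reverse]
  cases hd : List.dropWhile (· = '.') l.reverse with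
  | nil => simp
  | cons a t =>
    have h := List.head_dropWhile_not (p := (· = '.')) (l := l.reverse) (by rw [hd]; simp)
    simp only [hd] at h ⊢
    simpa using h

lemma pvGoA_rstrip : ∀ (n : Nat) (l : List Char), l.length ≤ n →
    pvGoA l = pvGoA (pvRstripDots l) := by
  intro n
  induction n with
  | zero =>
    intro l hl
    have : l = [] := List.eq_nil_of_length_eq_zero (Nat.le_zero.mp hl)
    subst this
    rw [rstrip_of_last_ne_dot (by simp)]
  | succ n ih =>
    intro l hl
    by_cases h : l.getLast? = some '.'
    · cases l with
      | nil => simp at h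
      | cons c cs =>
        have hstep : pvGoA (c :: cs) = pvGoA (c :: cs).dropLast := by
          rw [pvGoA]; rw [if_pos h]
        rw [hstep, rstrip_of_last_dot h]
        exact ih _ (by simp at hl ⊢; omega)
    · rw [rstrip_of_last_ne_dot h]

-- ===== VERDICT (by name: the statement is the Claim_ definition above) =====
theorem check_valid_note_spec : Claim_equal_check_valid_note := by
  intro note _
  unfold Spec_check_valid_note check_valid_note check_valid_note_alt
  rw [pvGoA_rstrip note.toList.length note.toList le_rfl]
  exact goA_eq_scanB (pvRstripDots note.toList).length _ le_rfl (rstrip_last_ne_dot _)
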